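-- pv_equiv track=rewrite | github.com/micheloosterhof/stethoscope | lib.py | ciphertext_autokey_vigenere_encrypt
-- ===== SOURCE A (Python) =====
-- from typing import Dict, List
--
-- MAX = 29
--
-- def ciphertext_autokey_vigenere_encrypt(
--     plaintext: List[int], primer: List[int] = [0]
-- ) -> List[int]:
--     """
--     Vigenere primitive without any console output, C=P+K
--     """
--     key: List[int] = primer.copy()
--     output: List[int] = []
--     for j in range(0, len(plaintext)):
--         c = (plaintext[j] + key[j]) % MAX
--         output.append(c)
--         key.append(c)
--     return output
-- ===== SOURCE B (Python) =====
-- from typing import List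
--
-- MAX = 29
--
-- def ciphertext_autokey_vigenere_encrypt(
--     plaintext: List[int], primer: List[int] = [0]
-- ) -> List[int]:
--     """
--     Ciphertext-autokey Vigenere, C=P+K, computed block-wise: the first block of
--     len(primer) letters is keyed by the primer, and each following block is
--     keyed by the previous block of ciphertext.
--     """
--     out: List[int] = []
--     key = primer
--     i = 0
--     while i < len(plaintext) and key:
--         block = [(p + k) % MAX for p, k in zip(plaintext[i:i + len(key)], key)]
--         out += block
--         i += len(block)
--         key = block
--     return out
-- ===== Notes on version B (the rewrite author's own statement) =====
-- stated objective: alternative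
-- what changed: Replaces A's per-index loop that grows a parallel key list (key[j] lookup, two appends per letter) with a block-wise scheme: encrypt one primer-length block at a time by zipping the current plaintext chunk with the previous ciphertext block, maintaining no key array at all.
import Mathlib
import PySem

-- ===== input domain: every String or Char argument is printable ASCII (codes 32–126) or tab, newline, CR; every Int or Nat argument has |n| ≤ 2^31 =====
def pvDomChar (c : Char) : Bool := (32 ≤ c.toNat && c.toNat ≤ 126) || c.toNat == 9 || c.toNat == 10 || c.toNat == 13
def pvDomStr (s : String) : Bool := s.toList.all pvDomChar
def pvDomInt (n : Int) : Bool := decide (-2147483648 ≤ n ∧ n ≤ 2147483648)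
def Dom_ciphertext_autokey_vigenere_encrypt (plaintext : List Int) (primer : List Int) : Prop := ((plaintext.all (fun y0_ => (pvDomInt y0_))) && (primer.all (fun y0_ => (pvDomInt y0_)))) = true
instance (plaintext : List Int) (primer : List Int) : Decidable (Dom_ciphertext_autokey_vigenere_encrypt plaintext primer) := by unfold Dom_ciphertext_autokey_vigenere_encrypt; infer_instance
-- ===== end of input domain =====

-- B re-implements ciphertext-autokey Vigenere block-wise over zipped chunks instead of A's
-- per-index loop with a growing parallel key list (objective: alternative; not faster).

-- ===== PORT A =====
-- A's loop 'for j in range(len(plaintext))' reading plaintext[j], key[j], appending c to both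
-- output and key, as structural recursion on plaintext carrying the index j and both lists.
-- key[j] is PySem.List.pyGet?; where it is none Python raises IndexError (excluded by Pre_),
-- the port returns the output built so far.
def pvALoop : List Int → Nat → List Int → List Int → List Int
  | [], _, _, out => out
  | p :: rest, j, key, out =>
    match PySem.List.pyGet? key (j : Int) with
    | none => out
    | some k =>
      let c := PySem.Int.mod (p + k) 29
      pvALoop rest (j + 1) (key ++ [c]) (out ++ [c])

def ciphertext_autokey_vigenere_encrypt (plaintext : List Int) (primer : List Int) : List Int :=
  pvALoop plaintext 0 primer []

-- ===== PORT B =====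
-- Source B's 'while i < len(plaintext) and key' loop: state i / key / out, one ciphertext block
-- per iteration, built by a comprehension over zip(plaintext[i:i+len(key)], key).
def pvBLoop (pt : List Int) (i : Nat) (key : List Int) (out : List Int) : List Int :=
  if h : i < pt.length ∧ key ≠ [] then
    let block := ((PySem.List.slice pt (some (i : Int)) (some ((i : Int) + (key.length : Int)))).zip key).map
      (fun pk => PySem.Int.mod (pk.1 + pk.2) 29)
    pvBLoop pt (i + block.length) block (out ++ block)
  else out
termination_by pt.length - i
decreasing_by
  have hlen : ((PySem.List.slice pt (some (i : Int)) (some ((i : Int) + (key.length : Int)))).zip key).length ≠ 0 := by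
    rw [PySem.List.slice_natCast_add]
    simp only [List.length_zip, List.length_take, List.length_drop]
    rcases h with ⟨h1, h2⟩
    have : key.length ≠ 0 := fun hk => h2 (List.eq_nil_of_length_eq_zero hk)
    omega
  simp only [List.length_map]
  omega

def ciphertext_autokey_vigenere_encrypt_alt (plaintext : List Int) (primer : List Int) : List Int :=
  pvBLoop plaintext 0 primer []

-- ===== PRECONDITION & SPEC =====
-- Python A raises IndexError (key[j] on an empty key) exactly when the primer is empty and the
-- plaintext is not; Pre_ admits every input on which A returns.
def Pre_ciphertext_autokey_vigenere_encrypt (plaintext : List Int) (primer : List Int) : Prop :=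
  plaintext = [] ∨ primer ≠ []
instance (plaintext : List Int) (primer : List Int) : Decidable (Pre_ciphertext_autokey_vigenere_encrypt plaintext primer) := by unfold Pre_ciphertext_autokey_vigenere_encrypt; infer_instance

def pvWitness_ciphertext_autokey_vigenere_encrypt : List Int × List Int := ([3, 17, 28, 0, 5], [7, 2])

def Spec_ciphertext_autokey_vigenere_encrypt (plaintext : List Int) (primer : List Int) (out : List Int) : Prop := out = ciphertext_autokey_vigenere_encrypt_alt plaintext primer
instance (plaintext : List Int) (primer : List Int) (out : List Int) : Decidable (Spec_ciphertext_autokey_vigenere_encrypt plaintext primer out) := by unfold Spec_ciphertext_autokey_vigenere_encrypt; infer_instance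

-- ===== CLAIM (what is proved, stated in full; the proofs are below) =====
def Claim_equal_ciphertext_autokey_vigenere_encrypt : Prop := ∀ (plaintext : List Int) (primer : List Int), Dom_ciphertext_autokey_vigenere_encrypt plaintext primer → Pre_ciphertext_autokey_vigenere_encrypt plaintext primer → Spec_ciphertext_autokey_vigenere_encrypt plaintext primer (ciphertext_autokey_vigenere_encrypt plaintext primer)

-- ===== LEMMAS AND PROOFS =====

-- Reference stream: the autokey key material still to be consumed, as a queue; each step uses
-- the queue head and enqueues the fresh ciphertext letter.
def pvStream : List Int → List Int → List Int
  | [], _ => []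
  | _ :: _, [] => []
  | p :: ps, k :: ks =>
    PySem.Int.mod (p + k) 29 :: pvStream ps (ks ++ [PySem.Int.mod (p + k) 29])

theorem pvStream_nil_key : ∀ (pt : List Int), pvStream pt [] = [] := by
  intro pt; cases pt <;> rfl

-- A's loop equals out ++ pvStream: the key queue at index j is key.drop j.
theorem pvALoop_eq_stream : ∀ (pt : List Int) (j : Nat) (key out : List Int),
    pvALoop pt j key out = out ++ pvStream pt (key.drop j) := by
  intro pt
  induction pt with
  | nil => intro j key out; simp [pvALoop, pvStream]
  | cons p ps ih =>
    intro j key out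
    rw [pvALoop]
    rw [PySem.List.pyGet?_natCast]
    rw [← List.head?_drop]
    cases hd : key.drop j with
    | nil => simp [pvStream]
    | cons k ks =>
      simp only [List.head?_cons]
      rw [ih]
      have hj : j < key.length := by
        by_contra hle
        have : key.drop j = [] := List.drop_eq_nil_of_le (by omega)
        simp [this] at hd
      have hdrop : (key ++ [PySem.Int.mod (p + k) 29]).drop (j + 1)
          = ks ++ [PySem.Int.mod (p + k) 29] := by
        rw [List.drop_append_of_le_length (by omega)]
        have htl : key.drop (j + 1) = ks := by
          rw [← List.tail_drop, hd]
          rfl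
        rw [htl]
      rw [hdrop, pvStream]
      simp

-- zip against a list truncates to its length (used to drop the slice's take).
theorem pvZipTake (l k : List Int) : (l.take k.length).zip k = l.zip k := by
  induction k generalizing l with
  | nil => simp
  | cons a as ih => cases l <;> simp [ih]

-- One block of B equals the corresponding segment of pvStream, for any pending queue 'rest'.
theorem pvStream_block : ∀ (key rest pt : List Int),
    pvStream pt (key ++ rest)
      = (pt.zip key).map (fun pk => PySem.Int.mod (pk.1 + pk.2) 29)
        ++ pvStream (pt.drop key.length)
            (rest ++ (pt.zip key).map (fun pk => PySem.Int.mod (pk.1 + pk.2) 29)) := by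
  intro key
  induction key with
  | nil => intro rest pt; simp
  | cons k ks ih =>
    intro rest pt
    cases pt with
    | nil => rfl
    | cons p ps =>
      simp only [List.cons_append, pvStream, List.zip_cons_cons, List.map_cons,
        List.length_cons, List.drop_succ_cons]
      rw [List.append_assoc ks rest [PySem.Int.mod (p + k) 29]]
      rw [ih (rest ++ [PySem.Int.mod (p + k) 29]) ps]
      simp

theorem pvBLoop_eq_stream : ∀ (n : Nat) (pt : List Int) (i : Nat) (key out : List Int),
    pt.length - i ≤ n → pvBLoop pt i key out = out ++ pvStream (pt.drop i) key := by
  intro n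
  induction n with
  | zero =>
    intro pt i key out hn
    rw [pvBLoop]
    rw [dif_neg (by rintro ⟨h1, _⟩; omega)]
    rw [List.drop_eq_nil_of_le (by omega)]
    simp [pvStream]
  | succ m ih =>
    intro pt i key out hn
    rw [pvBLoop]
    by_cases h : i < pt.length ∧ key ≠ []
    · rw [dif_pos h]
      obtain ⟨hi, hk⟩ := h
      have hkpos : 0 < key.length := List.length_pos_iff.mpr hk
      simp only [PySem.List.slice_natCast_add, pvZipTake]
      set blk := ((pt.drop i).zip key).map (fun pk => PySem.Int.mod (pk.1 + pk.2) 29) with hblk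
      have hblen : blk.length = min (pt.length - i) key.length := by
        simp [hblk]
      rw [ih pt (i + blk.length) blk (out ++ blk) (by omega)]
      have hdd : pt.drop (i + blk.length) = (pt.drop i).drop key.length := by
        rw [List.drop_drop]
        by_cases hle : key.length ≤ pt.length - i
        · congr 1
          omega
        · rw [List.drop_eq_nil_of_le (by omega), List.drop_eq_nil_of_le (by omega)]
      rw [hdd]
      have hb := pvStream_block key [] (pt.drop i)
      simp only [List.append_nil, List.nil_append, ← hblk] at hb
      rw [hb]
      simp
    · rw [dif_neg h]
      by_cases hi : i < pt.length
      · have hk : key = [] := by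
          by_contra hk
          exact h ⟨hi, hk⟩
        rw [hk, pvStream_nil_key]
        simp
      · rw [List.drop_eq_nil_of_le (by omega)]
        simp [pvStream]

-- ===== VERDICT (by name: the statement is the Claim_ definition above) =====
theorem ciphertext_autokey_vigenere_encrypt_spec : Claim_equal_ciphertext_autokey_vigenere_encrypt := by
  intro plaintext primer _ _
  unfold Spec_ciphertext_autokey_vigenere_encrypt
  unfold ciphertext_autokey_vigenere_encrypt ciphertext_autokey_vigenere_encrypt_alt
  rw [pvALoop_eq_stream, pvBLoop_eq_stream plaintext.length plaintext 0 primer [] (by omega)]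
  simp
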